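-- pv_equiv track=rewrite | github.com/rahultavnoji/AoC2022 | Day1/Calorie.py | calculate_calories
-- ===== SOURCE A (Python) =====
-- def calculate_calories(calories):
--     max, backup1, backup2 = 0, 0, 0
--     for calorie in calories:
--         if max < calorie:
--             backup2 = backup1
--             backup1 = max
--             max = calorie
--         elif backup1 < calorie:
--             backup2 = backup1
--             backup1 = calorie
--         elif backup2 < calorie:
--             backup2 = calorie
--     return max, max+backup1+backup2
-- ===== SOURCE B (Python) =====
-- def calculate_calories(calories):
--     a, b, c = sorted(list(calories) + [0, 0, 0], reverse=True)[:3]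
--     return a, a + b + c
-- ===== Notes on version B (the rewrite author's own statement) =====
-- stated objective: simpler
-- what changed: Replaces the hand-maintained three-register running-maximum loop with a sort of the values padded by the three zero floors, taking the top three of the descending order.
import Mathlib
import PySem

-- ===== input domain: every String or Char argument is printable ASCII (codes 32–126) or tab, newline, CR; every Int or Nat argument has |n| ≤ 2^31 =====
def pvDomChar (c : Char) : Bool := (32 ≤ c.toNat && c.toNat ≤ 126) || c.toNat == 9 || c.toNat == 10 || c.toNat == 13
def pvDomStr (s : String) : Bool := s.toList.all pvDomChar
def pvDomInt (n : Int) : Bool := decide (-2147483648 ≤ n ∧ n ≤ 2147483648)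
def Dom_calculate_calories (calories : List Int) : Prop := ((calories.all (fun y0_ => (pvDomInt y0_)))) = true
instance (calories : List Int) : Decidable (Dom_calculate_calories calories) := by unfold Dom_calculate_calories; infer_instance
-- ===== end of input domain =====

-- B replaces A's hand-maintained three-register running-maximum loop with a descending sort
-- of the values padded by the three zero floors (objective: simpler).

-- ===== PORT A =====
-- one loop iteration of A: state (max, backup1, backup2)
def calcStepA (st : Int × Int × Int) (calorie : Int) : Int × Int × Int :=
  if st.1 < calorie then (calorie, st.1, st.2.1)
  else if st.2.1 < calorie then (st.1, calorie, st.2.1)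
  else if st.2.2 < calorie then (st.1, st.2.1, calorie)
  else st

def calculate_calories (calories : List Int) : Int × Int :=
  let st := calories.foldl calcStepA (0, 0, 0)
  (st.1, st.1 + st.2.1 + st.2.2)

-- ===== PORT B =====
def calculate_calories_alt (calories : List Int) : Int × Int :=
  match (PySem.List.sorted (calories ++ [0, 0, 0]) (fun x => x) true).take 3 with
  | [a, b, c] => (a, a + b + c)
  | _ => (0, 0)  -- unreachable: the padded list always has ≥ 3 elements

-- ===== PRECONDITION & SPEC =====
def Spec_calculate_calories (calories : List Int) (out : Int × Int) : Prop := out = calculate_calories_alt calories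
instance (calories : List Int) (out : Int × Int) : Decidable (Spec_calculate_calories calories out) := by unfold Spec_calculate_calories; infer_instance

-- ===== CLAIM (what is proved, stated in full; the proofs are below) =====
def Claim_equal_calculate_calories : Prop := ∀ (calories : List Int), Dom_calculate_calories calories → Spec_calculate_calories calories (calculate_calories calories)

-- ===== LEMMAS AND PROOFS =====

-- Invariant of A's loop: the state is descending, and together with a list `rest` of
-- elements all ≤ backup2 it is a permutation of the inputs seen so far plus the initial state.
theorem calcA_invariant (xs : List Int) :
    ∀ (m b1 b2 : Int) (rest : List Int), b1 ≤ m → b2 ≤ b1 → (∀ y ∈ rest, y ≤ b2) →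
    ∃ (m' b1' b2' : Int) (rest' : List Int),
      xs.foldl calcStepA (m, b1, b2) = (m', b1', b2') ∧ b1' ≤ m' ∧ b2' ≤ b1' ∧
      (∀ y ∈ rest', y ≤ b2') ∧
      (m' :: b1' :: b2' :: rest').Perm (xs ++ m :: b1 :: b2 :: rest) := by
  induction xs with
  | nil =>
    intro m b1 b2 rest h1 h2 h3
    exact ⟨m, b1, b2, rest, rfl, h1, h2, h3, by simp⟩
  | cons x xs ih =>
    intro m b1 b2 rest h1 h2 h3
    -- combine: from IH's perm (over the new start list `nl`) and nl.Perm (x :: old), conclude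
    have comb : ∀ (res nl : List Int), res.Perm (xs ++ nl) →
        nl.Perm (x :: m :: b1 :: b2 :: rest) →
        res.Perm ((x :: xs) ++ m :: b1 :: b2 :: rest) := by
      intro res nl hres hnl
      refine hres.trans ((List.Perm.append_left xs hnl).trans ?_)
      exact List.perm_middle (a := x) (l₁ := xs) (l₂ := m :: b1 :: b2 :: rest)
    by_cases hx1 : m < x
    · have hb : ∀ y ∈ b2 :: rest, y ≤ b1 := by
        intro y hy
        rcases List.mem_cons.mp hy with rfl | h
        · exact h2
        · exact le_trans (h3 y h) h2
      obtain ⟨m', b1', b2', rest', heq, i1, i2, i3, i4⟩ :=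
        ih x m b1 (b2 :: rest) (le_of_lt hx1) h1 hb
      exact ⟨m', b1', b2', rest', by simpa [calcStepA, hx1] using heq, i1, i2, i3,
        comb _ _ i4 (List.Perm.refl _)⟩
    · by_cases hx2 : b1 < x
      · have hb : ∀ y ∈ b2 :: rest, y ≤ b1 := by
          intro y hy
          rcases List.mem_cons.mp hy with rfl | h
          · exact h2
          · exact le_trans (h3 y h) h2
        obtain ⟨m', b1', b2', rest', heq, i1, i2, i3, i4⟩ :=
          ih m x b1 (b2 :: rest) (by omega) (by omega) hb
        exact ⟨m', b1', b2', rest', by simpa [calcStepA, hx1, hx2] using heq, i1, i2, i3,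
          comb _ _ i4 (List.Perm.swap x m _)⟩
      · by_cases hx3 : b2 < x
        · have hb : ∀ y ∈ b2 :: rest, y ≤ x := by
            intro y hy
            rcases List.mem_cons.mp hy with rfl | h
            · exact le_of_lt hx3
            · exact le_trans (h3 y h) (le_of_lt hx3)
          obtain ⟨m', b1', b2', rest', heq, i1, i2, i3, i4⟩ :=
            ih m b1 x (b2 :: rest) h1 (by omega) hb
          refine ⟨m', b1', b2', rest', by simpa [calcStepA, hx1, hx2, hx3] using heq, i1, i2, i3,
            comb _ _ i4 ?_⟩
          simpa using (List.perm_middle (a := x) (l₁ := [m, b1]) (l₂ := b2 :: rest))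
        · have hb : ∀ y ∈ x :: rest, y ≤ b2 := by
            intro y hy
            rcases List.mem_cons.mp hy with rfl | h
            · omega
            · exact h3 y h
          obtain ⟨m', b1', b2', rest', heq, i1, i2, i3, i4⟩ :=
            ih m b1 b2 (x :: rest) h1 h2 hb
          refine ⟨m', b1', b2', rest', by simpa [calcStepA, hx1, hx2, hx3] using heq, i1, i2, i3,
            comb _ _ i4 ?_⟩
          simpa using (List.perm_middle (a := x) (l₁ := [m, b1, b2]) (l₂ := rest))

-- a descending (Pairwise ≥) rearrangement of xs IS sorted(xs, reverse=True)
theorem sorted_rev_eq_of_perm_of_pairwise_ge (xs l : List Int)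
    (hp : l.Perm xs) (hs : l.Pairwise (fun a b => b ≤ a)) :
    PySem.List.sorted xs (fun x => x) true = l := by
  have h1 : (PySem.List.sorted xs (fun x => x) true).Perm l :=
    (PySem.List.sorted_perm xs (fun x => x) true).trans hp.symm
  have h2 := PySem.List.sorted_pairwise_rev (xs := xs) (key := fun x => x)
  exact List.Perm.eq_of_pairwise (fun a b _ _ hab hba => le_antisymm hba hab) h2 hs h1

theorem calculate_calories_eq_alt (calories : List Int) :
    calculate_calories calories = calculate_calories_alt calories := by
  obtain ⟨m, b1, b2, rest, heq, i1, i2, i3, i4⟩ :=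
    calcA_invariant calories 0 0 0 [] le_rfl le_rfl (by simp)
  have hmem : ∀ y ∈ PySem.List.sorted rest (fun x => x) true, y ≤ b2 := by
    intro y hy
    exact i3 y ((PySem.List.mem_sorted rest (fun x => x) true y).mp hy)
  have hperm : (m :: b1 :: b2 :: (PySem.List.sorted rest (fun x => x) true)).Perm
      (calories ++ [0, 0, 0]) :=
    ((List.Perm.refl [m, b1, b2]).append (PySem.List.sorted_perm rest (fun x => x) true)).trans i4
  have hpw : (m :: b1 :: b2 :: (PySem.List.sorted rest (fun x => x) true)).Pairwise
      (fun a b : Int => b ≤ a) := by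
    refine List.Pairwise.cons ?_ (List.Pairwise.cons ?_ (List.Pairwise.cons hmem
      (PySem.List.sorted_pairwise_rev (xs := rest) (key := fun x => x))))
    · intro y hy
      rcases List.mem_cons.mp hy with rfl | hy'
      · exact i1
      · rcases List.mem_cons.mp hy' with rfl | hy''
        · exact le_trans i2 i1
        · exact le_trans (le_trans (hmem y hy'') i2) i1
    · intro y hy
      rcases List.mem_cons.mp hy with rfl | hy'
      · exact i2
      · exact le_trans (hmem y hy') i2
  have hsort := sorted_rev_eq_of_perm_of_pairwise_ge (calories ++ [0, 0, 0]) _ hperm hpw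
  simp [calculate_calories, calculate_calories_alt, heq, hsort]

-- ===== VERDICT (by name: the statement is the Claim_ definition above) =====
theorem calculate_calories_spec : Claim_equal_calculate_calories := by
  intro calories _
  exact calculate_calories_eq_alt calories
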